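-- pv_equiv track=rewrite | github.com/baddyscience/develop | algorithmTopic/叠盘子排序.py | solution
-- ===== SOURCE A (Python) =====
-- def solution(plates, n):
--     result = []
--     i = 0
--
--     while i < len(plates):
--         start = i
--         while i + 1 < len(plates) and plates[i + 1] == plates[i] + 1:
--             i += 1
--
--         if i - start >= 2:
--             result.append(f"{plates[start]}-{plates[i]}")
--         else:
--             for j in range(start, i + 1):
--                 result.append(str(plates[j]))
--
--         i += 1
--
--     return ",".join(result)
-- ===== SOURCE B (Python) =====
-- def solution(plates, n):
--     # two passes: build maximal consecutive runs, then format each run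
--     runs = []
--     cur = []
--     for x in plates:
--         if cur and cur[-1] + 1 == x:
--             cur.append(x)
--         else:
--             if cur:
--                 runs.append(cur)
--             cur = [x]
--     if cur:
--         runs.append(cur)
--     out = []
--     for r in runs:
--         if len(r) >= 3:
--             out.append(f"{r[0]}-{r[-1]}")
--         else:
--             out += [str(v) for v in r]
--     return ",".join(out)
-- ===== Notes on version B (the rewrite author's own statement) =====
-- stated objective: idiomatic
-- what changed: Replaces A's interleaved index-advancing while-loop (inner scan to find the run end, index arithmetic to format) with two separate passes: one fold that groups the list into maximal consecutive runs, then a formatting pass over the runs.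
import Mathlib
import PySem

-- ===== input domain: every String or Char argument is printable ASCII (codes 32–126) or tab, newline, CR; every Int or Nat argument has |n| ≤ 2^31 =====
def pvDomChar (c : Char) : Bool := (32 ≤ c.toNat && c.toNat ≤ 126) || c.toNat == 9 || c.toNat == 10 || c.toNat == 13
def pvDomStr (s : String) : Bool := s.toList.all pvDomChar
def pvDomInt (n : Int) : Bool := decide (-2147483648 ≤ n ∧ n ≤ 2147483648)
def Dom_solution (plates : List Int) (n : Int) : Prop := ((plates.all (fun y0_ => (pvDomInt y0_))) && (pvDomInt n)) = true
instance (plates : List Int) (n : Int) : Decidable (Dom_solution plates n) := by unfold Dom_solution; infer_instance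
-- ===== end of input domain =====

-- B replaces A's interleaved index-advancing while-loop by two separate passes
-- (group the list into maximal consecutive runs, then format the runs); same
-- cost, more idiomatic decomposition. Equivalence of return values is proved.

-- ===== PORT A =====
-- inner while loop of A: advance i while the next plate is consecutive
-- (indices are always nonnegative and in range here, so List.getD is exact for plates[i])
def innerA (plates : List Int) (i : Nat) : Nat :=
  if h : i + 1 < plates.length ∧ plates.getD (i+1) 0 = plates.getD i 0 + 1 then
    innerA plates (i+1)
  else i
termination_by plates.length - i
decreasing_by omega

theorem innerA_ge (plates : List Int) (i : Nat) : i ≤ innerA plates i := by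
  rw [innerA]
  split
  · exact le_trans (Nat.le_succ i) (innerA_ge plates (i+1))
  · exact le_refl i
termination_by plates.length - i
decreasing_by rename_i h; omega

-- outer while loop of A; range(start, i+1) is List.range' start (i+1-start) (start ≤ i+1 always)
def outerA (plates : List Int) (i : Nat) (result : List String) : List String :=
  if h : i < plates.length then
    let start := i
    let i' := innerA plates i
    let result' :=
      if 2 ≤ i' - start then
        result ++ [PySem.Int.toStr (plates.getD start 0) ++ "-" ++ PySem.Int.toStr (plates.getD i' 0)]
      else
        result ++ (List.range' start (i' + 1 - start)).map (fun j => PySem.Int.toStr (plates.getD j 0))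
    outerA plates (i' + 1) result'
  else result
termination_by plates.length - i
decreasing_by have := innerA_ge plates i; omega

def solution (plates : List Int) (n : Int) : String :=
  PySem.Str.join "," (outerA plates 0 [])

-- ===== PORT B =====
-- one step of B's grouping loop: state = (finished runs, current run)
def stepB (st : List (List Int) × List Int) (x : Int) : List (List Int) × List Int :=
  match st.2.getLast? with                          -- 'if cur and cur[-1] + 1 == x'
  | some v => if v + 1 = x then (st.1, st.2 ++ [x]) else (st.1 ++ [st.2], [x])
  | none => (st.1, [x])

-- final 'if cur: runs.append(cur)'
def flushB (st : List (List Int) × List Int) : List (List Int)  :=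
  if st.2 = [] then st.1 else st.1 ++ [st.2]

-- format one run (runs are always nonempty, so headD/getLastD are exact for r[0]/r[-1])
def fmtRun (r : List Int) : List String :=
  if 3 ≤ r.length then [PySem.Int.toStr (r.headD 0) ++ "-" ++ PySem.Int.toStr (r.getLastD 0)]
  else r.map PySem.Int.toStr

def solution_alt (plates : List Int) (n : Int) : String :=
  let runs := flushB (plates.foldl stepB ([], []))
  PySem.Str.join "," (runs.foldl (fun out r => out ++ fmtRun r) [])

-- ===== PRECONDITION & SPEC =====
def Spec_solution (plates : List Int) (n : Int) (out : String) : Prop := out = solution_alt plates n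
instance (plates : List Int) (n : Int) (out : String) : Decidable (Spec_solution plates n out) := by unfold Spec_solution; infer_instance

-- ===== CLAIM (what is proved, stated in full; the proofs are below) =====
def Claim_equal_solution : Prop := ∀ (plates : List Int) (n : Int), Dom_solution plates n → Spec_solution plates n (solution plates n)

-- ===== LEMMAS AND PROOFS =====

-- length of the maximal consecutive run continuing value p into l (excluding p itself)
def runlen : Int → List Int → Nat
  | _, [] => 0
  | p, x :: xs => if x = p + 1 then 1 + runlen x xs else 0

theorem runlen_le (p : Int) (l : List Int) : runlen p l ≤ l.length := by
  induction l generalizing p with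
  | nil => simp [runlen]
  | cons x xs ih =>
    simp only [runlen, List.length_cons]
    split
    · have := ih x; omega
    · omega

-- canonical decomposition of a list into its maximal consecutive runs
def runsOf : List Int → List (List Int)
  | [] => []
  | x :: xs => (x :: xs.take (runlen x xs)) :: runsOf (xs.drop (runlen x xs))
termination_by l => l.length
decreasing_by simp only [List.length_drop, List.length_cons]; omega

theorem runsOf_nil : runsOf [] = [] := by conv_lhs => unfold runsOf

theorem runsOf_cons (x : Int) (xs : List Int) :
    runsOf (x :: xs) = (x :: xs.take (runlen x xs)) :: runsOf (xs.drop (runlen x xs)) := by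
  conv_lhs => unfold runsOf

theorem foldB_char (xs : List Int) : ∀ (runs : List (List Int)) (cur : List Int), cur ≠ [] →
    flushB (xs.foldl stepB (runs, cur)) =
      runs ++ [cur ++ xs.take (runlen (cur.getLastD 0) xs)] ++ runsOf (xs.drop (runlen (cur.getLastD 0) xs)) := by
  induction xs with
  | nil =>
    intro runs cur hc
    simp [flushB, runlen, hc, runsOf_nil]
  | cons x xs ih =>
    intro runs cur hc
    have hv : cur.getLast? = some (cur.getLast hc) := List.getLast?_eq_some_getLast hc
    have hgl : cur.getLastD 0 = cur.getLast hc := by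
      rw [List.getLastD_eq_getLast?, hv]; rfl
    simp only [List.foldl_cons, stepB, hv]
    by_cases hx : cur.getLast hc + 1 = x
    · rw [if_pos hx]
      rw [ih runs (cur ++ [x]) (by simp)]
      have h2 : (cur ++ [x]).getLastD 0 = x := by simp
      rw [h2, hgl]
      have hrl : runlen (cur.getLast hc) (x :: xs) = runlen x xs + 1 := by
        simp only [runlen]
        rw [if_pos hx.symm]; omega
      rw [hrl]
      simp [List.take_succ_cons, List.drop_succ_cons, List.append_assoc]
    · rw [if_neg hx]
      rw [ih (runs ++ [cur]) [x] (by simp)]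
      have h0 : runlen (cur.getLastD 0) (x :: xs) = 0 := by
        rw [hgl]
        simp only [runlen]
        rw [if_neg (fun hcon => hx hcon.symm)]
      rw [h0]
      simp [runsOf_cons, List.append_assoc]

theorem runsB_eq (plates : List Int) : flushB (plates.foldl stepB ([], [])) = runsOf plates := by
  cases plates with
  | nil => simp [flushB, runsOf]
  | cons x xs =>
    have h1 : stepB ([], []) x = ([], [x]) := by simp [stepB]
    simp only [List.foldl_cons, h1]
    rw [foldB_char xs [] [x] (by simp)]
    simp [runsOf_cons, List.getLastD]

theorem inner_char (plates : List Int) : ∀ m i, plates.length - i ≤ m → i < plates.length →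
    innerA plates i = i + runlen (plates.getD i 0) (plates.drop (i+1)) := by
  intro m
  induction m with
  | zero => intro i h1 h2; omega
  | succ m ih =>
    intro i h1 h2
    rw [innerA]
    by_cases h : i + 1 < plates.length ∧ plates.getD (i+1) 0 = plates.getD i 0 + 1
    · rw [dif_pos h]
      rw [ih (i+1) (by omega) h.1]
      have hd : plates.drop (i+1) = plates.getD (i+1) 0 :: plates.drop (i+1+1) := by
        rw [List.getD_eq_getElem _ _ h.1, List.drop_eq_getElem_cons h.1]
      rw [hd]
      simp only [runlen, if_pos h.2]
      omega
    · rw [dif_neg h]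
      have : runlen (plates.getD i 0) (plates.drop (i+1)) = 0 := by
        by_cases hl : i + 1 < plates.length
        · have hd : plates.drop (i+1) = plates.getD (i+1) 0 :: plates.drop (i+1+1) := by
            rw [List.getD_eq_getElem _ _ hl, List.drop_eq_getElem_cons hl]
          rw [hd]
          simp only [runlen]
          rw [if_neg (fun hc => h ⟨hl, hc⟩)]
        · rw [List.drop_eq_nil_of_le (by omega)]; rfl
      omega

theorem range'_map_getD (plates : List Int) : ∀ (len i : Nat), i + len ≤ plates.length →
    (List.range' i len).map (fun j => plates.getD j 0) = (plates.drop i).take len := by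
  intro len
  induction len with
  | zero => intro i _; simp
  | succ k ih =>
    intro i h
    have hi : i < plates.length := by omega
    rw [List.range'_succ, List.map_cons, List.drop_eq_getElem_cons hi, List.take_succ_cons,
        ← List.getD_eq_getElem plates 0 hi, ih (i+1) (by omega)]

theorem getLastD_take_cons : ∀ (k : Nat) (x : Int) (l : List Int), k ≤ l.length →
    (x :: l.take k).getLastD 0 = (x :: l).getD k 0 := by
  intro k
  induction k with
  | zero => intro x l _; simp
  | succ k ih =>
    intro x l h
    cases l with
    | nil => simp at h
    | cons y ys =>
      rw [List.take_succ_cons]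
      have hne : (y :: ys.take k) ≠ [] := by simp
      have : (x :: y :: ys.take k).getLastD 0 = (y :: ys.take k).getLastD 0 := by
        simp [List.getLastD_eq_getLast?, List.getLast?_cons_cons]
      rw [this, ih y ys (by simpa using h)]
      simp

theorem outer_char (plates : List Int) : ∀ m i acc, plates.length - i ≤ m →
    outerA plates i acc = acc ++ (runsOf (plates.drop i)).flatMap fmtRun := by
  intro m
  induction m with
  | zero =>
    intro i acc h
    rw [outerA, dif_neg (by omega)]
    rw [List.drop_eq_nil_of_le (by omega), runsOf_nil]
    simp
  | succ m ih =>
    intro i acc h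
    by_cases hi : i < plates.length
    · rw [outerA, dif_pos hi]
      have hinner := inner_char plates (m+1) i h hi
      set x := plates.getD i 0 with hx
      set rest := plates.drop (i+1) with hrest
      set k := runlen x rest with hk
      have hkle : k ≤ rest.length := runlen_le x rest
      have hrlen : rest.length = plates.length - (i+1) := by simp [hrest]
      have hdropi : plates.drop i = x :: rest := by
        rw [hrest, hx, List.getD_eq_getElem _ _ hi, List.drop_eq_getElem_cons hi]
      have hrun : runsOf (plates.drop i) = (x :: rest.take k) :: runsOf (rest.drop k) := by
        rw [hdropi, runsOf_cons, ← hk]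
      have hdrop' : rest.drop k = plates.drop (i + k + 1) := by
        rw [hrest, List.drop_drop]; ring_nf
      rw [ih (innerA plates i + 1) _ (by have := innerA_ge plates i; omega)]
      rw [hinner]
      rw [hrun, List.flatMap_cons, hdrop', ← List.append_assoc]
      congr 1
      -- result' = acc ++ fmtRun (x :: rest.take k)
      have hlen : (x :: rest.take k).length = k + 1 := by
        simp [List.length_take, Nat.min_eq_left hkle]
      by_cases h2 : 2 ≤ i + k - i
      · rw [if_pos h2, fmtRun, if_pos (by omega)]
        rw [List.headD_cons, getLastD_take_cons k x rest hkle, ← hdropi]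
        have hgd : (List.drop i plates).getD k 0 = plates.getD (i + k) 0 := by
          rw [List.getD_eq_getElem?_getD, List.getD_eq_getElem?_getD, List.getElem?_drop]
        rw [hgd]
      · rw [if_neg h2, fmtRun, if_neg (by omega)]
        have hkk : i + k + 1 - i = k + 1 := by omega
        rw [hkk,
            show (fun j => PySem.Int.toStr (plates.getD j 0)) =
              PySem.Int.toStr ∘ (fun j => plates.getD j 0) from rfl,
            ← List.map_map, range'_map_getD plates (k+1) i (by omega), hdropi,
            List.take_succ_cons]
    · rw [outerA, dif_neg hi]
      rw [List.drop_eq_nil_of_le (by omega)]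
      simp [runsOf]

-- ===== VERDICT (by name: the statement is the Claim_ definition above) =====
theorem solution_spec : Claim_equal_solution := by
  intro plates n _
  show solution plates n = solution_alt plates n
  simp only [solution, solution_alt, runsB_eq]
  rw [outer_char plates plates.length 0 [] (by omega), List.drop_zero,
      PySem.List.foldl_append_eq_flatMap]
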